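-- pv_equiv track=rewrite | github.com/SkyGlider/FIT1045 | Week 7 Lab/W7Task2.py | bounded_lists
-- ===== SOURCE A (Python) =====
-- def bounded_lists(upperbounds):
--
--     n = len(upperbounds)
--     first = n*[0]
--     last = upperbounds
--     res = [first]
--     while res[-1] != last:
--         res += [lex_suc(res[-1],last)]
--
--     return res
--
-- def lex_suc(bitlst,ub):
--
--     res = bitlst[:]
--     i = len(res) - 1
--
--     #if the value in current index is same as value in upperbounds, change to 0
--     #then move one index backward
--     while res[i] == ub[i]:
--
--         res[i] = 0
--         i -= 1
--
--     #increment by 1 instead of going back to zero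
--     res[i] += 1
--
--     return res
-- ===== SOURCE B (Python) =====
-- import itertools
--
-- def bounded_lists(upperbounds):
--     return [list(t) for t in itertools.product(*(range(ub + 1) for ub in upperbounds))]
-- ===== Notes on version B (the rewrite author's own statement) =====
-- stated objective: idiomatic
-- what changed: Replaces the repeated successor-with-carry enumeration (which extends the result list one successor at a time via res[-1]) by the standard-library Cartesian product of ranges, itertools.product, converted to lists.
import Mathlib
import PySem

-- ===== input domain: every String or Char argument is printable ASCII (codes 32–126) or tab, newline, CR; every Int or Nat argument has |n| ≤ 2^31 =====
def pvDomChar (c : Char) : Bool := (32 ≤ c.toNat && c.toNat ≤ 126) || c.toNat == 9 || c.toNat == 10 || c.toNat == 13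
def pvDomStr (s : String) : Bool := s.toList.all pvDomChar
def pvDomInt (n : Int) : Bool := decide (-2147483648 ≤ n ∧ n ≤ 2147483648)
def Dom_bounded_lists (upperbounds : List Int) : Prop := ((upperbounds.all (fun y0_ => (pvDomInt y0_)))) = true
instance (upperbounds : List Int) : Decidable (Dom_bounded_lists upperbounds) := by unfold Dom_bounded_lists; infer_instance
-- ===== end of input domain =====

-- B replaces A's successor-with-carry enumeration by a direct Cartesian product of the ranges
-- (itertools.product); same return value on all componentwise non-negative bounds (Pre_).

-- ===== PORT A =====
-- while res[i] == ub[i]: res[i] = 0; i -= 1   -- then res[i] += 1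
-- Ported with i : Nat counting down. When i = 0 and res[0] == ub[0], Python would continue at
-- i = -1 (negative-index wraparound, never terminating); that state is unreachable in A, which
-- calls lex_suc only with bitlst ≠ ub, so the value returned there is irrelevant to bounded_lists.
def lexSucAux : Nat → List Int → List Int → List Int
  | i, res, ub =>
    if res.getD i 0 = ub.getD i 0 then
      match i with
      | 0 => res.set 0 0
      | j+1 => lexSucAux j (res.set (j+1) 0) ub
    else res.set i (res.getD i 0 + 1)

def lexSuc (bitlst ub : List Int) : List Int := lexSucAux (bitlst.length - 1) bitlst ub

-- A's while loop 'while res[-1] != last: res += [lex_suc(res[-1], last)]', made total with a fuel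
-- guard; fuel = prod (u+1) bounds the number of iterations on every input satisfying Pre_.
-- res is nonempty throughout, so res[-1] is ported as res.getLastD [].
def boundedAux : Nat → List (List Int) → List Int → List (List Int)
  | 0, res, _ => res
  | f+1, res, last => if res.getLastD [] ≠ last then boundedAux f (res ++ [lexSuc (res.getLastD []) last]) last else res

def bounded_lists (upperbounds : List Int) : List (List Int) :=
  boundedAux ((upperbounds.map (fun u => (u+1).toNat)).prod)
    [List.replicate upperbounds.length 0] upperbounds

-- ===== PORT B =====
-- [list(t) for t in itertools.product(*(range(ub+1) for ub in upperbounds))],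
-- the library product ported as the standard recursion (last coordinate varies fastest).
def bounded_lists_alt : List Int → List (List Int)
  | [] => [[]]
  | u :: rest => (PySem.List.pyRange 0 (u+1) 1).flatMap (fun x => (bounded_lists_alt rest).map (fun t => x :: t))

-- ===== PRECONDITION & SPEC =====
-- Pre_ excludes bounds with a negative component: there A's while loop never reaches 'last'
-- (lex_suc eventually wraps into negative indices) and A does not return.
def Pre_bounded_lists (upperbounds : List Int) : Prop := ∀ u ∈ upperbounds, 0 ≤ u
instance (upperbounds : List Int) : Decidable (Pre_bounded_lists upperbounds) := by unfold Pre_bounded_lists; infer_instance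

def pvWitness_bounded_lists : List Int := ([1, 2] : List Int)

def Spec_bounded_lists (upperbounds : List Int) (out : List (List Int)) : Prop := out = bounded_lists_alt upperbounds
instance (upperbounds : List Int) (out : List (List Int)) : Decidable (Spec_bounded_lists upperbounds out) := by unfold Spec_bounded_lists; infer_instance

-- ===== CLAIM (what is proved, stated in full; the proofs are below) =====
def Claim_equal_bounded_lists : Prop := ∀ (upperbounds : List Int), Dom_bounded_lists upperbounds → Pre_bounded_lists upperbounds → Spec_bounded_lists upperbounds (bounded_lists upperbounds)

-- ===== LEMMAS AND PROOFS =====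

-- The run of A's while loop starting from a current list c, as a standalone sequence.
def chain : Nat → List Int → List Int → List (List Int)
  | 0, c, _ => [c]
  | f+1, c, last => if c ≠ last then c :: chain f (lexSuc c last) last else [c]

theorem chain_ne_nil (f : Nat) (c last : List Int) : chain f c last ≠ [] := by
  cases f with
  | zero => simp [chain]
  | succ n => by_cases h : c = last <;> simp [chain, h]

theorem boundedAux_eq (f : Nat) (res : List (List Int)) (c last : List Int) :
    boundedAux f (res ++ [c]) last = res ++ chain f c last := by
  induction f generalizing res c with
  | zero => simp [boundedAux, chain]
  | succ f ih =>
    simp only [boundedAux, chain, List.getLastD_concat]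
    split
    · rw [ih]; simp
    · rfl

theorem chain_last (f : Nat) (last : List Int) : chain f last last = [last] := by
  cases f <;> simp [chain]

theorem getLastD_irrel {α : Type} (l : List α) (h : l ≠ []) (d d' : α) :
    l.getLastD d = l.getLastD d' := by
  cases l with
  | nil => exact absurd rfl h
  | cons a t => rw [List.getLastD_cons, List.getLastD_cons]

theorem chain_split (f1 f2 : Nat) (c last : List Int) :
    chain (f1 + f2) c last = (chain f1 c last).dropLast ++ chain f2 ((chain f1 c last).getLastD []) last := by
  induction f1 generalizing c with
  | zero => simp [chain]
  | succ f1 ih =>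
    rw [show f1 + 1 + f2 = (f1 + f2) + 1 by omega]
    by_cases h : c = last
    · subst h
      simp [chain, chain_last]
    · simp only [chain, if_pos h, ih,
        List.dropLast_cons_of_ne_nil (chain_ne_nil f1 (lexSuc c last) last),
        List.getLastD_cons, List.cons_append]
      rw [getLastD_irrel _ (chain_ne_nil f1 (lexSuc c last) last) c []]

theorem length_lexSucAux (i : Nat) (res ub : List Int) : (lexSucAux i res ub).length = res.length := by
  induction i generalizing res with
  | zero => unfold lexSucAux; split <;> simp
  | succ j ih => unfold lexSucAux; split
                 · rw [ih]; simp
                 · simp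

theorem length_lexSuc (c ub : List Int) : (lexSuc c ub).length = c.length := by
  simp [lexSuc, length_lexSucAux]

-- tail step of the carry scan: if some position ≤ i of the tail disagrees with ub's tail,
-- the scan never touches the head
theorem lexSucAux_cons (x u : Int) (rest : List Int) (i : Nat) (c : List Int)
    (h : ∃ j, j ≤ i ∧ c.getD j 0 ≠ rest.getD j 0) :
    lexSucAux (i+1) (x :: c) (u :: rest) = x :: lexSucAux i c rest := by
  induction i generalizing c with
  | zero =>
    obtain ⟨j, hj, hne⟩ := h
    interval_cases j
    rw [lexSucAux, lexSucAux]
    simp only [List.getD_cons_succ]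
    rw [if_neg hne, if_neg hne]
    simp [List.set_cons_succ]
  | succ j ih =>
    rw [lexSucAux]
    conv_rhs => rw [lexSucAux]
    simp only [List.getD_cons_succ]
    split
    · rename_i heq
      rw [List.set_cons_succ]
      apply ih
      obtain ⟨m, hm, hne⟩ := h
      have hmne : m ≠ j + 1 := fun hmj => hne (hmj ▸ heq)
      refine ⟨m, by omega, ?_⟩
      rw [List.getD, List.getD, List.getElem?_set_ne (by omega)]
      exact hne
    · simp [List.set_cons_succ]

theorem exists_getD_ne (c rest : List Int) (hlen : c.length = rest.length) (hne : c ≠ rest) :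
    ∃ j, j < c.length ∧ c.getD j 0 ≠ rest.getD j 0 := by
  by_contra hall
  push Not at hall
  apply hne
  apply List.ext_getElem hlen
  intro j h1 h2
  have := hall j h1
  rwa [List.getD_eq_getElem c 0 h1, List.getD_eq_getElem rest 0 h2] at this

theorem lexSuc_cons (x u : Int) (c rest : List Int) (hlen : c.length = rest.length) (hne : c ≠ rest) :
    lexSuc (x :: c) (u :: rest) = x :: lexSuc c rest := by
  obtain ⟨j, hj, hd⟩ := exists_getD_ne c rest hlen hne
  have hc : c.length ≠ 0 := by intro h0; exact hne (by
    have : rest.length = 0 := by omega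
    rw [List.length_eq_zero_iff.mp h0, List.length_eq_zero_iff.mp this])
  unfold lexSuc
  rw [show (x :: c).length - 1 = (c.length - 1) + 1 by simp; omega]
  rw [lexSucAux_cons x u rest _ c ⟨j, by omega, hd⟩]

def zeroUpTo : List Int → Nat → List Int
  | c, 0 => c.set 0 0
  | c, i+1 => zeroUpTo (c.set (i+1) 0) i

theorem zeroUpTo_eq (c : List Int) (i : Nat) :
    zeroUpTo c i = List.replicate (min (i+1) c.length) 0 ++ c.drop (i+1) := by
  induction i generalizing c with
  | zero =>
    cases c with
    | nil => simp [zeroUpTo]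
    | cons a t => simp [zeroUpTo]
  | succ i ih =>
    rw [zeroUpTo, ih, List.length_set]
    rcases Nat.lt_or_ge (i+1) c.length with h | h
    · have hdrop : (c.set (i+1) 0).drop (i+1) = 0 :: c.drop (i+2) := by
        rw [List.drop_set, if_neg (lt_irrefl _)]
        simp only [Nat.sub_self]
        rw [List.drop_eq_getElem_cons h, List.set_cons_zero]
      rw [hdrop, show min (i+1) c.length = i+1 by omega,
        show min (i+1+1) c.length = (i+1)+1 by omega]
      conv_rhs => rw [List.replicate_succ', List.append_assoc]
      rfl
    · rw [List.set_eq_of_length_le (by omega)]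
      rw [List.drop_eq_nil_of_le (by omega), List.drop_eq_nil_of_le (by omega)]
      rw [show min (i+1) c.length = c.length by omega, show min (i+1+1) c.length = c.length by omega]

-- full carry: the tail agrees with ub's tail everywhere, so it is zeroed out and the head bumps
theorem lexSucAux_carry (x u : Int) (rest : List Int) (i : Nat) (c : List Int)
    (hagree : ∀ j, j ≤ i → c.getD j 0 = rest.getD j 0) (hxu : x ≠ u) :
    lexSucAux (i+1) (x :: c) (u :: rest) = (x+1) :: zeroUpTo c i := by
  induction i generalizing c with
  | zero =>
    rw [lexSucAux]
    simp only [List.getD_cons_succ]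
    rw [if_pos (hagree 0 (le_refl 0)), List.set_cons_succ]
    rw [lexSucAux]
    simp only [List.getD_cons_zero]
    rw [if_neg hxu]
    simp [zeroUpTo]
  | succ i ih =>
    rw [lexSucAux]
    simp only [List.getD_cons_succ]
    rw [if_pos (hagree (i+1) (le_refl _)), List.set_cons_succ]
    rw [ih (c.set (i+1) 0) ?_, zeroUpTo]
    intro j hj
    rw [List.getD, List.getD, List.getElem?_set_ne (by omega)]
    exact hagree j (by omega)

theorem lexSuc_carry (x u : Int) (rest : List Int) (hxu : x ≠ u) :
    lexSuc (x :: rest) (u :: rest) = (x+1) :: List.replicate rest.length 0 := by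
  cases rest with
  | nil =>
    show lexSucAux 0 [x] [u] = [x+1]
    rw [lexSucAux]
    simp [hxu]
  | cons b t =>
    unfold lexSuc
    rw [show (x :: b :: t).length - 1 = (b :: t).length - 1 + 1 by simp]
    rw [lexSucAux_carry x u (b :: t) _ (b :: t) (fun _ _ => rfl) hxu]
    rw [zeroUpTo_eq]
    congr 1
    rw [show (b :: t).length - 1 + 1 = (b :: t).length by simp]
    simp

-- lifting a run on the tail under a fixed head
theorem chain_cons (u : Int) (rest : List Int) (f : Nat) :
    ∀ (x : Int) (c : List Int), c.length = rest.length →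
    (x = u ∨ (chain f c rest).length = f + 1) →
    chain f (x :: c) (u :: rest) = (chain f c rest).map (x :: ·) := by
  induction f with
  | zero => intro x c _ _; simp [chain]
  | succ f ih =>
    intro x c hlen hdisj
    by_cases hc : c = rest
    · subst hc
      have hx : x = u := by
        rcases hdisj with hx | hl
        · exact hx
        · rw [chain_last] at hl; simp at hl
      subst hx
      rw [chain_last, chain_last]
      rfl
    · have hne2' : x :: c ≠ u :: rest := by simp [hc]
      rw [chain, if_pos hne2', lexSuc_cons x u c rest hlen hc]
      conv_rhs => rw [chain, if_pos hc]
      rw [List.map_cons]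
      congr 1
      apply ih x (lexSuc c rest) (by rw [length_lexSuc]; exact hlen)
      rcases hdisj with hx | hl
      · exact Or.inl hx
      · refine Or.inr ?_
        rw [chain, if_pos hc, List.length_cons] at hl
        omega

theorem getLastD_append {α : Type} (l1 l2 : List α) (d : α) (h : l2 ≠ []) :
    (l1 ++ l2).getLastD d = l2.getLastD d := by
  induction l1 with
  | nil => rfl
  | cons a t ih =>
    rw [List.cons_append, List.getLastD_cons,
      getLastD_irrel (t ++ l2) (by simp [h]) a d, ih]

theorem getLastD_map {α β : Type} (f : α → β) (l : List α) (h : l ≠ []) (d : β) (d' : α) :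
    (l.map f).getLastD d = f (l.getLastD d') := by
  induction l with
  | nil => exact absurd rfl h
  | cons a t ih =>
    cases t with
    | nil => rfl
    | cons b t2 =>
      rw [List.map_cons, List.getLastD_cons, List.getLastD_cons,
        getLastD_irrel _ (by simp : (b :: t2).map f ≠ []) (f a) d,
        ih (by simp), getLastD_irrel _ (by simp : b :: t2 ≠ []) d' a]

theorem dropLast_getLastD_cons {α : Type} (l : List α) (h : l ≠ []) (d : α) (T : List α) :
    l.dropLast ++ l.getLastD d :: T = l ++ T := by
  induction l generalizing d with
  | nil => exact absurd rfl h
  | cons a t ih =>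
    cases t with
    | nil => rfl
    | cons b t2 =>
      rw [List.dropLast_cons_of_ne_nil (by simp), List.getLastD_cons,
        List.cons_append, ih (by simp) a, List.cons_append]
      rfl

theorem alt_length (ub : List Int) (h : ∀ u ∈ ub, 0 ≤ u) :
    (bounded_lists_alt ub).length = (ub.map (fun u => (u+1).toNat)).prod := by
  induction ub with
  | nil => simp [bounded_lists_alt]
  | cons u rest ih =>
    have hu : 0 ≤ u := h u (by simp)
    have hrest : ∀ v ∈ rest, 0 ≤ v := fun v hv => h v (by simp [hv])
    rw [bounded_lists_alt, List.length_flatMap]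
    simp only [List.length_map, ih hrest]
    rw [List.map_const', List.sum_replicate, smul_eq_mul,
      PySem.List.length_pyRange_one, List.map_cons, List.prod_cons]
    congr 1
    omega

theorem alt_ne_nil (ub : List Int) (h : ∀ u ∈ ub, 0 ≤ u) : bounded_lists_alt ub ≠ [] := by
  intro hnil
  have := alt_length ub h
  rw [hnil] at this
  have hpos : 1 ≤ (ub.map (fun u => (u+1).toNat)).prod := by
    apply List.one_le_prod
    intro a ha
    simp only [List.mem_map] at ha
    obtain ⟨v, hv, rfl⟩ := ha
    have := h v hv
    omega
  simp at this
  omega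

theorem alt_getLastD (ub : List Int) (h : ∀ u ∈ ub, 0 ≤ u) :
    (bounded_lists_alt ub).getLastD [] = ub := by
  induction ub with
  | nil => rfl
  | cons u rest ih =>
    have hu : 0 ≤ u := h u (by simp)
    have hrest : ∀ v ∈ rest, 0 ≤ v := fun v hv => h v (by simp [hv])
    rw [bounded_lists_alt, PySem.List.pyRange_one_succ_right hu, List.flatMap_append,
      List.flatMap_cons, List.flatMap_nil, List.append_nil]
    rw [getLastD_append _ _ _ (by simp [alt_ne_nil rest hrest]),
      getLastD_map _ _ (alt_ne_nil rest hrest) _ [], ih hrest]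

theorem prod_pos (ub : List Int) (h : ∀ u ∈ ub, 0 ≤ u) :
    1 ≤ (ub.map (fun u => (u+1).toNat)).prod := by
  apply List.one_le_prod
  intro a ha
  simp only [List.mem_map] at ha
  obtain ⟨v, hv, rfl⟩ := ha
  have := h v hv
  omega

-- the run over the head coordinate from x up to u, tail starting at zeros
theorem chain_block (rest : List Int) (u : Int) (hrest : ∀ v ∈ rest, 0 ≤ v) (hu : 0 ≤ u)
    (hIH : chain ((rest.map (fun v => (v+1).toNat)).prod - 1) (List.replicate rest.length 0) rest = bounded_lists_alt rest) :
    ∀ (k : Nat) (x : Int), 0 ≤ x → x + k = u →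
    chain (k * (rest.map (fun v => (v+1).toNat)).prod + ((rest.map (fun v => (v+1).toNat)).prod - 1))
        (x :: List.replicate rest.length 0) (u :: rest)
      = (PySem.List.pyRange x (u+1) 1).flatMap (fun y => (bounded_lists_alt rest).map (y :: ·)) := by
  intro k
  induction k with
  | zero =>
    intro x hx0 hxu
    have hx : x = u := by omega
    subst hx
    rw [Nat.zero_mul, Nat.zero_add, PySem.List.pyRange_one_singleton, List.flatMap_cons,
      List.flatMap_nil, List.append_nil]
    rw [chain_cons x rest _ x (List.replicate rest.length 0) (by simp) (Or.inl rfl), hIH]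
  | succ k ih =>
    intro x hx0 hxu
    have hM : 1 ≤ (rest.map (fun v => (v+1).toNat)).prod := prod_pos rest hrest
    set M := (rest.map (fun v => (v+1).toNat)).prod with hMdef
    have hxu' : x ≠ u := by omega
    have h1 : chain (M - 1) (x :: List.replicate rest.length 0) (u :: rest)
        = (bounded_lists_alt rest).map (x :: ·) := by
      rw [chain_cons u rest _ x (List.replicate rest.length 0) (by simp)
        (Or.inr (by rw [hIH, alt_length rest hrest]; omega)), hIH]
    rw [show (k+1) * M + (M - 1) = (M - 1) + (k * M + M) by rw [Nat.succ_mul]; omega]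
    rw [chain_split, h1]
    have hlast : ((bounded_lists_alt rest).map (x :: ·)).getLastD [] = x :: rest := by
      rw [getLastD_map _ _ (alt_ne_nil rest hrest) _ [], alt_getLastD rest hrest]
    rw [hlast]
    have hne : x :: rest ≠ u :: rest := by simp [hxu']
    rw [show k * M + M = (k * M + (M - 1)) + 1 by omega]
    rw [chain, if_pos hne, lexSuc_carry x u rest hxu']
    rw [ih (x+1) (by omega) (by omega), ← hlast,
      dropLast_getLastD_cons _ (by simp [alt_ne_nil rest hrest]) [],
      PySem.List.pyRange_one_cons (by omega : x < u + 1), List.flatMap_cons]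

theorem chain_zeros (ub : List Int) (h : ∀ u ∈ ub, 0 ≤ u) :
    chain ((ub.map (fun u => (u+1).toNat)).prod - 1) (List.replicate ub.length 0) ub = bounded_lists_alt ub := by
  induction ub with
  | nil => rfl
  | cons u rest ih =>
    have hu : 0 ≤ u := h u (by simp)
    have hrest : ∀ v ∈ rest, 0 ≤ v := fun v hv => h v (by simp [hv])
    have hM : 1 ≤ (rest.map (fun v => (v+1).toNat)).prod := prod_pos rest hrest
    rw [List.map_cons, List.prod_cons]
    simp only [List.length_cons, List.replicate_succ]
    rw [show (u+1).toNat * (rest.map (fun v => (v+1).toNat)).prod - 1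
        = u.toNat * (rest.map (fun v => (v+1).toNat)).prod
          + ((rest.map (fun v => (v+1).toNat)).prod - 1) by
      rw [show (u+1).toNat = u.toNat + 1 by omega, Nat.succ_mul]; omega]
    rw [chain_block rest u hrest hu (ih hrest) u.toNat 0 (le_refl 0) (by omega)]
    rfl

theorem chain_full (ub : List Int) (h : ∀ u ∈ ub, 0 ≤ u) :
    chain ((ub.map (fun u => (u+1).toNat)).prod) (List.replicate ub.length 0) ub = bounded_lists_alt ub := by
  have hN : 1 ≤ (ub.map (fun u => (u+1).toNat)).prod := prod_pos ub h
  rw [show (ub.map (fun u => (u+1).toNat)).prod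
      = ((ub.map (fun u => (u+1).toNat)).prod - 1) + 1 by omega]
  rw [chain_split, chain_zeros ub h, alt_getLastD ub h, chain_last]
  have := dropLast_getLastD_cons (bounded_lists_alt ub) (alt_ne_nil ub h) [] []
  rw [alt_getLastD ub h] at this
  simpa using this

-- ===== VERDICT (by name: the statement is the Claim_ definition above) =====
theorem bounded_lists_spec : Claim_equal_bounded_lists := by
  intro ub _ hpre
  unfold Spec_bounded_lists bounded_lists
  have h := boundedAux_eq ((ub.map (fun u => (u+1).toNat)).prod) [] (List.replicate ub.length 0) ub
  simp only [List.nil_append] at h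
  rw [h, chain_full ub hpre]
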